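-- pv_equiv track=rewrite | github.com/KimJonghoSNU/Abstraction_gap | src/run_round6_beampack.py | _deepest_selected_ancestor_for_leaf
-- ===== SOURCE A (Python) =====
-- from typing import Any, Dict, List, Optional, Sequence, Set, Tuple
--
-- def _leaf_path_is_under_prefix(path: Tuple[int, ...], prefix: Tuple[int, ...]) -> bool:
--     return (len(prefix) <= len(path)) and (tuple(path[: len(prefix)]) == tuple(prefix))
--
-- def _deepest_selected_ancestor_for_leaf(
--     leaf_path: Tuple[int, ...],
--     selected_paths: Sequence[Tuple[int, ...]],
-- ) -> Optional[Tuple[int, ...]]: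
--     candidates = [
--         tuple(path)
--         for path in selected_paths
--         if path and _leaf_path_is_under_prefix(tuple(leaf_path), tuple(path))
--     ]
--     if not candidates:
--         return None
--     return max(candidates, key=len)
-- ===== SOURCE B (Python) =====
-- def _deepest_selected_ancestor_for_leaf(leaf_path, selected_paths):
--     selected = {tuple(p) for p in selected_paths if p}
--     t = tuple(leaf_path)
--     for k in sorted({len(p) for p in selected}, reverse=True):
--         if k <= len(t) and t[:k] in selected:
--             return t[:k]
--     return None
-- ===== Notes on version B (the rewrite author's own statement) =====
-- stated objective: alternative
-- what changed: Instead of scanning selected_paths for prefix candidates and taking max-by-length, B builds a set of the non-empty selected paths once, then probes the leaf's own prefix at each distinct selected-path length from longest to shortest and returns the first prefix found in the set.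
import Mathlib
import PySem

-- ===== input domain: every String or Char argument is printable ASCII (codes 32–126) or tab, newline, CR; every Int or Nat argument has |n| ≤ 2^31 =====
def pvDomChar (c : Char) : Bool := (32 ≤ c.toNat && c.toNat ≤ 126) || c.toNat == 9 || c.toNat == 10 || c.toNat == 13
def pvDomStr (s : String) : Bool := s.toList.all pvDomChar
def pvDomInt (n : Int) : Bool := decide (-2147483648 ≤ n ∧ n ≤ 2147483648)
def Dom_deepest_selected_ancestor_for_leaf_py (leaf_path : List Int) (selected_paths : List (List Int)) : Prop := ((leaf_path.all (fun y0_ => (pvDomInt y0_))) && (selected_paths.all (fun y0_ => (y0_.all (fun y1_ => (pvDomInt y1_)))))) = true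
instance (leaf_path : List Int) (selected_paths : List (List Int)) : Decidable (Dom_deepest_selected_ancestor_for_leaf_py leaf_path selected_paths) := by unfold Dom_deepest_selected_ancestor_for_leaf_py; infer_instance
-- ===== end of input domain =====

-- B builds the set of non-empty selected paths once and probes the leaf's prefixes
-- at each distinct selected-path length, longest first, returning the first hit
-- (idiomatic alternative: prefix-membership instead of candidate scan + max).

-- ===== PORT A =====
-- helper: _leaf_path_is_under_prefix
def pvLeafPathIsUnderPrefix (path : List Int) (pfx : List Int) : Bool :=
  decide (pfx.length ≤ path.length) &&
  decide (PySem.List.slice path none (some (pfx.length : Int)) = pfx)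

def deepest_selected_ancestor_for_leaf_py (leaf_path : List Int) (selected_paths : List (List Int)) : Option (List Int) :=
  let candidates := selected_paths.filter
    (fun path => (!path.isEmpty) && pvLeafPathIsUnderPrefix leaf_path path)
  if candidates.isEmpty then none
  else PySem.List.max? candidates (fun p => p.length)

-- ===== PORT B =====
-- the 'for k in sorted(..., reverse=True)' loop with its early return
def pvAltLoop (leaf : List Int) (selected : PySem.Set (List Int)) : List Nat → Option (List Int)
  | [] => none
  | k :: ks =>
    if decide (k ≤ leaf.length) && PySem.Set.contains selected (leaf.take k) then
      some (leaf.take k)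
    else pvAltLoop leaf selected ks

def deepest_selected_ancestor_for_leaf_py_alt (leaf_path : List Int) (selected_paths : List (List Int)) : Option (List Int) :=
  let selected := PySem.Set.ofList (selected_paths.filter (fun p => !p.isEmpty))
  let lens := PySem.List.sorted (PySem.Set.ofList (selected.map (fun p => p.length))) (fun x => x) true
  pvAltLoop leaf_path selected lens

-- ===== PRECONDITION & SPEC =====
def Spec_deepest_selected_ancestor_for_leaf_py (leaf_path : List Int) (selected_paths : List (List Int)) (out : Option (List Int)) : Prop := out = deepest_selected_ancestor_for_leaf_py_alt leaf_path selected_paths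
instance (leaf_path : List Int) (selected_paths : List (List Int)) (out : Option (List Int)) : Decidable (Spec_deepest_selected_ancestor_for_leaf_py leaf_path selected_paths out) := by unfold Spec_deepest_selected_ancestor_for_leaf_py; infer_instance

-- ===== CLAIM (what is proved, stated in full; the proofs are below) =====
def Claim_equal_deepest_selected_ancestor_for_leaf_py : Prop := ∀ (leaf_path : List Int) (selected_paths : List (List Int)), Dom_deepest_selected_ancestor_for_leaf_py leaf_path selected_paths → Spec_deepest_selected_ancestor_for_leaf_py leaf_path selected_paths (deepest_selected_ancestor_for_leaf_py leaf_path selected_paths)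

-- ===== LEMMAS AND PROOFS =====

-- membership in B's set
theorem pv_contains_sel (sel : List (List Int)) (x : List Int) :
    x ∈ PySem.Set.ofList (sel.filter (fun p => !p.isEmpty)) ↔ (x ∈ sel ∧ x ≠ []) := by
  simp [PySem.Set.mem_ofList, List.mem_filter]

-- candidate characterization for A
theorem pv_mem_candidates (leaf : List Int) (sel : List (List Int)) (p : List Int) :
    p ∈ sel.filter (fun path => (!path.isEmpty) && pvLeafPathIsUnderPrefix leaf path) ↔
    (p ∈ sel ∧ p ≠ [] ∧ p.length ≤ leaf.length ∧ leaf.take p.length = p) := by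
  simp [List.mem_filter, pvLeafPathIsUnderPrefix, PySem.List.slice_to_natCast]

-- a prefix of leaf of length 1 ≤ k ≤ leaf.length that is in sel is a candidate
theorem pv_take_candidate (leaf : List Int) (sel : List (List Int)) (k : Nat)
    (h1 : 1 ≤ k) (h2 : k ≤ leaf.length) (hmem : leaf.take k ∈ sel) :
    leaf.take k ∈ sel.filter (fun path => (!path.isEmpty) && pvLeafPathIsUnderPrefix leaf path) := by
  rw [pv_mem_candidates]
  have hlen : (leaf.take k).length = k := by simp [List.length_take]; omega
  refine ⟨hmem, ?_, ?_, ?_⟩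
  · intro h; rw [h] at hlen; simp at hlen; omega
  · omega
  · rw [hlen]
  
theorem pv_loop_none (leaf : List Int) (S : PySem.Set (List Int)) (ks : List Nat) :
    pvAltLoop leaf S ks = none ↔ ∀ k ∈ ks, ¬(k ≤ leaf.length ∧ leaf.take k ∈ S) := by
  induction ks with
  | nil => simp [pvAltLoop]
  | cons a t ih =>
    simp only [pvAltLoop]
    by_cases hc : a ≤ leaf.length ∧ leaf.take a ∈ S
    · have : (decide (a ≤ leaf.length) && PySem.Set.contains S (leaf.take a)) = true := by
        simp [PySem.Set.contains, hc.1, hc.2]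
      simp only [this, if_true, reduceCtorEq, false_iff, not_forall]
      exact ⟨a, by simp, by simp [hc]⟩
    · have : (decide (a ≤ leaf.length) && PySem.Set.contains S (leaf.take a)) = false := by
        rcases Decidable.not_and_iff_not_or_not.mp hc with h | h <;>
          simp [PySem.Set.contains, h]
      simp only [this, Bool.false_eq_true, if_false, ih, List.mem_cons]
      constructor
      · rintro h k (rfl | hk)
        · exact hc
        · exact h k hk
      · intro h k hk; exact h k (Or.inr hk)

theorem pv_loop_some (leaf : List Int) (S : PySem.Set (List Int)) (ks : List Nat) (r : List Int)
    (hp : ks.Pairwise (· > ·)) (h : pvAltLoop leaf S ks = some r) :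
    ∃ k ∈ ks, k ≤ leaf.length ∧ leaf.take k ∈ S ∧ r = leaf.take k ∧
      ∀ j ∈ ks, k < j → ¬(j ≤ leaf.length ∧ leaf.take j ∈ S) := by
  induction ks with
  | nil => simp [pvAltLoop] at h
  | cons a t ih =>
    rw [List.pairwise_cons] at hp
    simp only [pvAltLoop] at h
    by_cases hc : a ≤ leaf.length ∧ leaf.take a ∈ S
    · have hb : (decide (a ≤ leaf.length) && PySem.Set.contains S (leaf.take a)) = true := by
        simp [PySem.Set.contains, hc.1, hc.2]
      simp only [hb, if_true, Option.some.injEq] at h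
      refine ⟨a, by simp, hc.1, hc.2, h.symm, ?_⟩
      intro j hj hlt
      rcases List.mem_cons.mp hj with rfl | hj'
      · omega
      · exact absurd (hp.1 j hj') (by omega)
    · have hb : (decide (a ≤ leaf.length) && PySem.Set.contains S (leaf.take a)) = false := by
        rcases Decidable.not_and_iff_not_or_not.mp hc with hx | hx <;>
          simp [PySem.Set.contains, hx]
      simp only [hb, Bool.false_eq_true, if_false] at h
      obtain ⟨k, hk, h2, h3, h4, h5⟩ := ih hp.2 h
      refine ⟨k, List.mem_cons_of_mem _ hk, h2, h3, h4, ?_⟩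
      intro j hj hlt
      rcases List.mem_cons.mp hj with rfl | hj'
      · exact hc
      · exact h5 j hj' hlt

-- the probed lengths are exactly the lengths of non-empty selected paths
theorem pv_mem_lens (sel : List (List Int)) (k : Nat) :
    k ∈ PySem.List.sorted (PySem.Set.ofList ((PySem.Set.ofList (sel.filter (fun p => !p.isEmpty))).map (fun p => p.length))) (fun x => x) true ↔
    ∃ p ∈ sel, p ≠ [] ∧ p.length = k := by
  simp [PySem.List.mem_sorted, PySem.Set.mem_ofList, List.mem_map, List.mem_filter]
  tauto

theorem pv_lens_pairwise (sel : List (List Int)) :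
    (PySem.List.sorted (PySem.Set.ofList ((PySem.Set.ofList (sel.filter (fun p => !p.isEmpty))).map (fun p => p.length))) (fun x => x) true).Pairwise (· > ·) := by
  have hnd : (PySem.List.sorted (PySem.Set.ofList ((PySem.Set.ofList (sel.filter (fun p => !p.isEmpty))).map (fun p => p.length))) (fun x => x) true).Nodup :=
    ((PySem.List.sorted_perm _ _ _).nodup_iff).mpr (PySem.Set.nodup_ofList _)
  have hle := PySem.List.sorted_pairwise_rev (PySem.Set.ofList ((PySem.Set.ofList (sel.filter (fun p => !p.isEmpty))).map (fun p => p.length))) (fun x => x)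
  have := List.Pairwise.and hle hnd
  refine this.imp ?_
  rintro a b ⟨h1, h2⟩
  omega

theorem pv_main (leaf : List Int) (sel : List (List Int)) :
    deepest_selected_ancestor_for_leaf_py leaf sel = deepest_selected_ancestor_for_leaf_py_alt leaf sel := by
  unfold deepest_selected_ancestor_for_leaf_py deepest_selected_ancestor_for_leaf_py_alt
  set cs := sel.filter (fun path => (!path.isEmpty) && pvLeafPathIsUnderPrefix leaf path) with hcs
  set S := PySem.Set.ofList (sel.filter (fun p => !p.isEmpty)) with hS
  set lens := PySem.List.sorted (PySem.Set.ofList (S.map (fun p => p.length))) (fun x => x) true with hlens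
  have hk1 : ∀ k ∈ lens, 1 ≤ k := by
    intro k hk
    rw [hlens, hS, pv_mem_lens] at hk
    obtain ⟨p, _, hpne, hpk⟩ := hk
    cases p with
    | nil => exact absurd rfl hpne
    | cons a t => simp at hpk; omega
  by_cases hemp : cs.isEmpty
  · rw [if_pos hemp]
    symm
    rw [pv_loop_none]
    rintro k hk ⟨hklen, hkS⟩
    rw [hS, pv_contains_sel] at hkS
    have := pv_take_candidate leaf sel k (hk1 k hk) hklen hkS.1
    rw [← hcs] at this
    rw [List.isEmpty_iff] at hemp
    simp [hemp] at this
  · rw [if_neg hemp]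
    have hne : cs ≠ [] := fun h => hemp (by simp [h])
    obtain ⟨m, hm⟩ : ∃ m, PySem.List.max? cs (fun p => p.length) = some m := by
      cases h : PySem.List.max? cs (fun p => p.length) with
      | none => rw [PySem.List.max?_eq_none_iff] at h; exact absurd h hne
      | some m => exact ⟨m, rfl⟩
    rw [hm]
    have hmmem : m ∈ cs := PySem.List.max?_mem hm
    have hmax : ∀ y ∈ cs, y.length ≤ m.length := PySem.List.max?_isMax hm
    rw [hcs, pv_mem_candidates] at hmmem
    obtain ⟨hmsel, hmne, hmlen, hmtake⟩ := hmmem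
    have hmlens : m.length ∈ lens := by
      rw [hlens, hS, pv_mem_lens]; exact ⟨m, hmsel, hmne, rfl⟩
    have hcontains : leaf.take m.length ∈ S := by
      rw [hS, pv_contains_sel, hmtake]; exact ⟨hmsel, hmne⟩
    cases hloop : pvAltLoop leaf S lens with
    | none =>
      rw [pv_loop_none] at hloop
      exact absurd ⟨hmlen, hcontains⟩ (hloop m.length hmlens)
    | some r =>
      obtain ⟨k, hk, h2, h3, h4, h5⟩ :=
        pv_loop_some leaf S lens r (by rw [hlens, hS]; exact pv_lens_pairwise sel) hloop
      have hk_can : leaf.take k ∈ cs := by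
        rw [hS, pv_contains_sel] at h3
        exact pv_take_candidate leaf sel k (hk1 k hk) h2 h3.1
      have hk_le : k ≤ m.length := by
        have := hmax _ hk_can
        have hlen : (leaf.take k).length = k := by simp [List.length_take]; omega
        omega
      have hm_le : m.length ≤ k := by
        by_contra hcon
        exact absurd ⟨hmlen, hcontains⟩ (h5 m.length hmlens (by omega))
      rw [h4, show k = m.length by omega, hmtake]

-- ===== VERDICT (by name: the statement is the Claim_ definition above) =====
theorem deepest_selected_ancestor_for_leaf_py_spec : Claim_equal_deepest_selected_ancestor_for_leaf_py := by
  intro leaf sel _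
  unfold Spec_deepest_selected_ancestor_for_leaf_py
  exact pv_main leaf sel
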